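-- pv_equiv track=rewrite | github.com/Yterayut/vm-daily-report-system | mobile_api.py | format_alerts
-- ===== SOURCE A (Python) =====
-- def format_alerts(alerts):
--     """Format alerts for display"""
--     formatted_alerts = []
--
--     # Critical alerts
--     for alert in alerts.get('critical', [])[:3]:
--         formatted_alerts.append({
--             'type': 'critical',
--             'title': f"Critical: {alert.get('metric', 'Alert')}",
--             'detail': alert.get('message', 'Critical issue detected'),
--             'time': 'Now'
--         })
--
--     # Warning alerts
--     for alert in alerts.get('warning', [])[:2]:
--         formatted_alerts.append({
--             'type': 'warning',
--             'title': f"Warning: {alert.get('metric', 'Alert')}",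
--             'detail': alert.get('message', 'Warning condition'),
--             'time': '2 min ago'
--         })
--
--     # Offline alerts
--     for alert in alerts.get('offline', [])[:2]:
--         formatted_alerts.append({
--             'type': 'critical',
--             'title': 'VM Offline',
--             'detail': alert.get('message', 'VM is offline'),
--             'time': 'Now'
--         })
--
--     # Success message if no alerts
--     if not formatted_alerts:
--         healthy_count = len(alerts.get('healthy', []))
--         formatted_alerts.append({
--             'type': 'success',
--             'title': 'All Systems Normal',
--             'detail': f"{healthy_count} VMs running normally",
--             'time': 'Just now'
--         })
--
--     return formatted_alerts
-- ===== SOURCE B (Python) =====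
-- def format_alerts(alerts):
--     """Format alerts for display (built back-to-front by cons recursion)."""
--     def rows(lst, make, tail):
--         # right-fold: prepend formatted entries for lst in front of tail
--         if not lst:
--             return tail
--         return [make(lst[0])] + rows(lst[1:], make, tail)
--
--     def crit(a):
--         return {'type': 'critical',
--                 'title': 'Critical: ' + a.get('metric', 'Alert'),
--                 'detail': a.get('message', 'Critical issue detected'),
--                 'time': 'Now'}
--
--     def warn(a):
--         return {'type': 'warning',
--                 'title': 'Warning: ' + a.get('metric', 'Alert'),
--                 'detail': a.get('message', 'Warning condition'),
--                 'time': '2 min ago'}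
--
--     def offl(a):
--         return {'type': 'critical',
--                 'title': 'VM Offline',
--                 'detail': a.get('message', 'VM is offline'),
--                 'time': 'Now'}
--
--     result = rows(alerts.get('offline', [])[:2], offl, [])
--     result = rows(alerts.get('warning', [])[:2], warn, result)
--     result = rows(alerts.get('critical', [])[:3], crit, result)
--     return result or [{'type': 'success',
--                        'title': 'All Systems Normal',
--                        'detail': f"{len(alerts.get('healthy', []))} VMs running normally",
--                        'time': 'Just now'}]
-- ===== Notes on version B (the rewrite author's own statement) =====
-- stated objective: alternative
-- what changed: A appends entries front-to-back with three imperative accumulator loops; B builds the list back-to-front, right-folding each category onto the tail with a recursive cons-prepending helper (offline first, then warning, then critical), and uses 'result or [success]' for the fallback.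
import Mathlib
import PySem

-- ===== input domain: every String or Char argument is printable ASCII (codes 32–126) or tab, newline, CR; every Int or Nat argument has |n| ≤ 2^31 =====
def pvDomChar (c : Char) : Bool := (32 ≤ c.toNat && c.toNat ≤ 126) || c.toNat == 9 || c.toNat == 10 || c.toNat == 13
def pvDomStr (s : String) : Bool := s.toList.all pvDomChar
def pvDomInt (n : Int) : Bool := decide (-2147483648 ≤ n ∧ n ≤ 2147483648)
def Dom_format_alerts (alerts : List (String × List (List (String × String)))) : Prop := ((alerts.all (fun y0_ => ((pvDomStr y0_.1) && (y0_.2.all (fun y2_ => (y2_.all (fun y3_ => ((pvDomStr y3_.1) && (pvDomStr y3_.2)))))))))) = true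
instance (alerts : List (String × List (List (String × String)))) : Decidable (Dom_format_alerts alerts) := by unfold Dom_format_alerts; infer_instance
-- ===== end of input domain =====

-- B builds the display list back-to-front by cons recursion (offline, then warning,
-- then critical prepended), instead of A's three front-to-back appending loops; same
-- values, objective: alternative.

-- ===== PORT A =====
def format_alerts (alerts : List (String × List (List (String × String)))) : List (List (String × String)) :=
  let d := PySem.Dict.mk alerts
  -- Critical alerts
  let fa1 := (PySem.List.slice (d.getD "critical" []) none (some 3)).foldl
    (fun acc alert => acc ++ [[("type", "critical"),
      ("title", "Critical: " ++ (PySem.Dict.mk alert).getD "metric" "Alert"),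
      ("detail", (PySem.Dict.mk alert).getD "message" "Critical issue detected"),
      ("time", "Now")]]) []
  -- Warning alerts
  let fa2 := (PySem.List.slice (d.getD "warning" []) none (some 2)).foldl
    (fun acc alert => acc ++ [[("type", "warning"),
      ("title", "Warning: " ++ (PySem.Dict.mk alert).getD "metric" "Alert"),
      ("detail", (PySem.Dict.mk alert).getD "message" "Warning condition"),
      ("time", "2 min ago")]]) fa1
  -- Offline alerts
  let fa3 := (PySem.List.slice (d.getD "offline" []) none (some 2)).foldl
    (fun acc alert => acc ++ [[("type", "critical"),
      ("title", "VM Offline"),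
      ("detail", (PySem.Dict.mk alert).getD "message" "VM is offline"),
      ("time", "Now")]]) fa2
  -- Success message if no alerts
  if fa3 = [] then
    fa3 ++ [[("type", "success"),
      ("title", "All Systems Normal"),
      ("detail", PySem.Int.toStr ((d.getD "healthy" []).length : Int) ++ " VMs running normally"),
      ("time", "Just now")]]
  else fa3

-- ===== PORT B =====
-- right-fold helper: prepend the formatted entries for lst in front of tail
def pvRows (lst : List (List (String × String)))
    (make : List (String × String) → List (String × String))
    (tail : List (List (String × String))) : List (List (String × String)) :=
  match lst with
  | [] => tail
  | x :: rest => [make x] ++ pvRows rest make tail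

def format_alerts_alt (alerts : List (String × List (List (String × String)))) : List (List (String × String)) :=
  let crit := fun (a : List (String × String)) =>
    [("type", "critical"),
     ("title", "Critical: " ++ (PySem.Dict.mk a).getD "metric" "Alert"),
     ("detail", (PySem.Dict.mk a).getD "message" "Critical issue detected"),
     ("time", "Now")]
  let warn := fun (a : List (String × String)) =>
    [("type", "warning"),
     ("title", "Warning: " ++ (PySem.Dict.mk a).getD "metric" "Alert"),
     ("detail", (PySem.Dict.mk a).getD "message" "Warning condition"),
     ("time", "2 min ago")]
  let offl := fun (a : List (String × String)) =>
    [("type", "critical"),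
     ("title", "VM Offline"),
     ("detail", (PySem.Dict.mk a).getD "message" "VM is offline"),
     ("time", "Now")]
  let result := pvRows (PySem.List.slice ((PySem.Dict.mk alerts).getD "offline" []) none (some 2)) offl []
  let result := pvRows (PySem.List.slice ((PySem.Dict.mk alerts).getD "warning" []) none (some 2)) warn result
  let result := pvRows (PySem.List.slice ((PySem.Dict.mk alerts).getD "critical" []) none (some 3)) crit result
  if result = [] then
    [[("type", "success"),
      ("title", "All Systems Normal"),
      ("detail", PySem.Int.toStr (((PySem.Dict.mk alerts).getD "healthy" []).length : Int) ++ " VMs running normally"),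
      ("time", "Just now")]]
  else result

-- ===== PRECONDITION & SPEC =====
def Spec_format_alerts (alerts : List (String × List (List (String × String)))) (out : List (List (String × String))) : Prop := out = format_alerts_alt alerts
instance (alerts : List (String × List (List (String × String)))) (out : List (List (String × String))) : Decidable (Spec_format_alerts alerts out) := by unfold Spec_format_alerts; infer_instance

-- ===== CLAIM =====
def Claim_equal_format_alerts : Prop := ∀ (alerts : List (String × List (List (String × String)))), Dom_format_alerts alerts → Spec_format_alerts alerts (format_alerts alerts)

-- ===== LEMMAS AND PROOFS =====
theorem pvRows_eq_map_append (lst : List (List (String × String)))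
    (make : List (String × String) → List (String × String))
    (tail : List (List (String × String))) :
    pvRows lst make tail = lst.map make ++ tail := by
  induction lst with
  | nil => rfl
  | cons x rest ih => simp [pvRows, ih]

-- ===== VERDICT =====
theorem format_alerts_spec : Claim_equal_format_alerts := by
  intro alerts _
  unfold Spec_format_alerts format_alerts format_alerts_alt
  simp only [pvRows_eq_map_append, PySem.List.foldl_append_singleton_eq_map,
    List.append_nil, List.nil_append, List.append_assoc]
  split_ifs with h
  · simp only [List.append_eq_nil_iff] at h
    simp [h.1, h.2.1, h.2.2]
  · rfl
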